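-- pv_equiv track=rewrite | github.com/Walkingheadache/Network-Project | IdentifySlash.py | Identify_s_host
-- ===== SOURCE A (Python) =====
-- def Identify_s_host(ip = None ,host = None):
--
--     count = 0
--     start =  0
--
--     while host > start:
--         new_num = pow(2,count) - 2
--         start = new_num
--         if host > start:
--             count += 1
--
--     slash = 32 - count
--
--     return f"The slash for {ip} with {host} hosts is {slash}"
-- ===== SOURCE B (Python) =====
-- def Identify_s_host(ip=None, host=None):
--     count = (host + 1).bit_length() if host > 0 else 0
--     slash = 32 - count
--     return f"The slash for {ip} with {host} hosts is {slash}"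
-- ===== Notes on version B (the rewrite author's own statement) =====
-- stated objective: simpler
-- what changed: Replaces the doubling while-loop with a closed form: count = (host+1).bit_length() for positive host, else 0.
import Mathlib
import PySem

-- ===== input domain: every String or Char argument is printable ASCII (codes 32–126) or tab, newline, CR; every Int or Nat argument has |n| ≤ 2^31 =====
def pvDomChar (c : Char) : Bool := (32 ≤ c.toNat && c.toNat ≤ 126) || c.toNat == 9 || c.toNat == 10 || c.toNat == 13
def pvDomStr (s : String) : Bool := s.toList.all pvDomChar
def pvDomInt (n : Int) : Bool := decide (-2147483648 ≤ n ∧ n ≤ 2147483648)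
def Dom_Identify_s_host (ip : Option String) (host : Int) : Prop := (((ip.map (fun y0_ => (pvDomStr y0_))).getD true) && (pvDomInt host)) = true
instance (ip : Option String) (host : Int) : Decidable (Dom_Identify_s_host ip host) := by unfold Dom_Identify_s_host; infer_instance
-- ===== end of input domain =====

-- ===== PORT A =====
-- A counts loop iterations doubling 2^count until 2^count - 2 >= host.
def Identify_s_host_loop (host : Int) (count : Nat) (start : Int) : Nat :=
  if host > start then
    let new_num := (2:Int)^count - 2
    if host > new_num then Identify_s_host_loop host (count+1) new_num else count
  else count
termination_by (host + 2 - (2:Int)^count).toNat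
decreasing_by
  have h1 : (0:Int) < (2:Int)^count := pow_pos (by norm_num) count
  have h2 : (2:Int)^(count+1) = 2 * (2:Int)^count := by ring
  omega


def Identify_s_host (ip : Option String) (host : Int) : String :=
  let count := Identify_s_host_loop host 0 0
  let slash : Int := 32 - (count : Int)
  "The slash for " ++ (match ip with | none => "None" | some s => s) ++
    " with " ++ PySem.Int.toStr host ++ " hosts is " ++ PySem.Int.toStr slash

-- ===== PORT B =====
-- B: closed form — count = (host+1).bit_length() if host > 0 else 0.
def Identify_s_host_alt (ip : Option String) (host : Int) : String :=
  let count : Nat := if host > 0 then PySem.Int.bitLength (host + 1) else 0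
  let slash : Int := 32 - (count : Int)
  "The slash for " ++ (match ip with | none => "None" | some s => s) ++
    " with " ++ PySem.Int.toStr host ++ " hosts is " ++ PySem.Int.toStr slash

-- ===== PRECONDITION & SPEC =====

def Spec_Identify_s_host (ip : Option String) (host : Int) (out : String) : Prop := out = Identify_s_host_alt ip host
instance (ip : Option String) (host : Int) (out : String) : Decidable (Spec_Identify_s_host ip host out) := by unfold Spec_Identify_s_host; infer_instance

-- ===== CLAIM (what is proved, stated in full; the proofs are below) =====
def Claim_equal_Identify_s_host : Prop := ∀ (ip : Option String) (host : Int), Dom_Identify_s_host ip host → Spec_Identify_s_host ip host (Identify_s_host ip host)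

-- ===== LEMMAS AND PROOFS =====

lemma loop_eq_bitLength (host : Int) (hpos : 0 < host) :
    ∀ (k c : Nat) (s : Int), host > s → c + k = PySem.Int.bitLength (host + 1) →
      (c = 0 ∨ (2:Int)^(c-1) < host + 2) →
      Identify_s_host_loop host c s = PySem.Int.bitLength (host + 1) := by
  have habs : ((host + 1).natAbs : Int) = host + 1 := Int.natAbs_of_nonneg (by omega)
  have hub : host + 1 < (2:Int)^(PySem.Int.bitLength (host + 1)) := by
    calc host + 1 = ((host + 1).natAbs : Int) := habs.symm
      _ < (2:Int)^(PySem.Int.bitLength (host + 1)) := by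
          exact_mod_cast PySem.Int.lt_two_pow_bitLength (host + 1)
  have hlb : (2:Int)^(PySem.Int.bitLength (host + 1) - 1) ≤ host + 1 := by
    calc (2:Int)^(PySem.Int.bitLength (host + 1) - 1)
        ≤ ((host + 1).natAbs : Int) := by
          exact_mod_cast PySem.Int.two_pow_bitLength_le (host + 1) (by omega)
      _ = host + 1 := habs
  intro k
  induction k with
  | zero =>
    intro c s hs hck _
    have hc : c = PySem.Int.bitLength (host + 1) := by omega
    have hno : ¬ host > (2:Int)^c - 2 := by rw [hc]; omega
    rw [Identify_s_host_loop]
    simp only [hs, hno, if_true, if_false]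
    exact hc
  | succ k ih =>
    intro c s hs hck _
    have hcle : (2:Int)^c ≤ (2:Int)^(PySem.Int.bitLength (host + 1) - 1) :=
      pow_le_pow_right₀ (by norm_num) (by omega)
    have henter : host > (2:Int)^c - 2 := by omega
    have hlt : (2:Int)^c < host + 2 := by omega
    rw [Identify_s_host_loop, if_pos hs]
    simp only [if_pos henter]
    exact ih (c + 1) _ henter (by omega) (Or.inr (by simpa using hlt))

lemma loop_eq_count (host : Int) :
    Identify_s_host_loop host 0 0 =
      (if host > 0 then PySem.Int.bitLength (host + 1) else 0) := by
  by_cases h : host > 0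
  · rw [if_pos h]
    exact loop_eq_bitLength host h (PySem.Int.bitLength (host + 1)) 0 0 h (by omega) (Or.inl rfl)
  · rw [if_neg h, Identify_s_host_loop, if_neg h]

-- ===== VERDICT (by name: the statement is the Claim_ definition above) =====
theorem Identify_s_host_spec : Claim_equal_Identify_s_host := by
  intro ip host _
  unfold Spec_Identify_s_host Identify_s_host Identify_s_host_alt
  rw [loop_eq_count]
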